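-- pv_equiv track=rewrite | github.com/bocilmion7-dev/scantop | pattern_digit.py | delay_digit
-- ===== SOURCE A (Python) =====
-- def delay_digit(data, pos):
--     delay = [0] * 10
--     last_seen = [-1] * 10
--     for i, row in enumerate(data):
--         digit = row[pos]
--         for d in range(10):
--             if last_seen[d] != -1:
--                 delay[d] = i - last_seen[d]
--         last_seen[digit] = i
--     return delay
-- ===== SOURCE B (Python) =====
-- def delay_digit(data, pos):
--     n = len(data)
--     last = {}
--     for i, row in enumerate(data[:-1]):
--         last[row[pos]] = i
--     return [n - 1 - last[d] if d in last else 0 for d in range(10)]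
-- ===== Notes on version B (the rewrite author's own statement) =====
-- stated objective: simpler
-- what changed: B replaces A's per-row inner 10-iteration rewrite of the whole delay array by a single pass over all rows except the last recording each digit's most recent row index in a dict, then derives delay[d] = (n-1) - last[d] once at the end.
-- intended difference: On inputs where some row before the last selects a negative value in -10..-1, A's Python negative indexing wraps it into last_seen and reports a bogus delay for digit 10+d, while B reports 0 for digits never seen - the intended value, since digits are 0..9. — e.g. on delay_digit([[-1], [5]], 0): A returns [0, 0, 0, 0, 0, 0, 0, 0, 0, 1], B returns [0, 0, 0, 0, 0, 0, 0, 0, 0, 0]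
import Mathlib
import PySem

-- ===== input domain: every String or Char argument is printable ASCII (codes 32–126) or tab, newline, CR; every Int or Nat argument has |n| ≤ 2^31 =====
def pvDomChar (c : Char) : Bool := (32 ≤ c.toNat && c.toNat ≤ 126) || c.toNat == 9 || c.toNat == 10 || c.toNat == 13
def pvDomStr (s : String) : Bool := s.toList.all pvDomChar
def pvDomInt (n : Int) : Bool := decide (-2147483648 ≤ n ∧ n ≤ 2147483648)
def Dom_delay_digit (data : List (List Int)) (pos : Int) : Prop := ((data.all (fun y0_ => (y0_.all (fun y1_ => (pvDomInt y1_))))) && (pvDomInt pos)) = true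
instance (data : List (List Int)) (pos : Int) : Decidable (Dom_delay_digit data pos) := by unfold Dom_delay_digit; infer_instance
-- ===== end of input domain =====

-- B records, in one dict pass over all rows but the last, each digit's most recent row index,
-- then derives the ten delays once at the end; equivalence is about the return value only.

-- ===== PORT A =====
def delay_digit (data : List (List Int)) (pos : Int) : List Int :=
  let init : List Int × List Int := (List.replicate 10 0, List.replicate 10 (-1))
  let final := (PySem.List.enumerate data 0).foldl (fun st p =>
    let digit : Int := (PySem.List.pyGet? p.2 pos).getD 0
    let delay := (PySem.List.pyRange 0 10 1).foldl (fun dl d =>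
      if PySem.List.pyGetD st.2 d 0 ≠ -1 then PySem.List.pySetD dl d (p.1 - PySem.List.pyGetD st.2 d 0) else dl) st.1
    (delay, PySem.List.pySetD st.2 digit p.1)) init
  final.1

-- ===== PORT B =====
def delay_digit_alt (data : List (List Int)) (pos : Int) : List Int :=
  let n : Int := data.length
  let last : PySem.Dict Int Int := (PySem.List.enumerate (PySem.List.slice data none (some (-1))) 0).foldl
    (fun d p => d.insert ((PySem.List.pyGet? p.2 pos).getD 0) p.1) PySem.Dict.empty
  (PySem.List.pyRange 0 10 1).map (fun dd =>
    match last.get? dd with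
    | some i => n - 1 - i
    | none => 0)

-- ===== PRECONDITION & SPEC =====
-- Pre_ admits exactly the inputs on which Python A returns: every row must have a valid index pos
-- and select a value in -10..9 (a value outside -10..9 makes A's last_seen[digit] raise IndexError).
def Pre_delay_digit (data : List (List Int)) (pos : Int) : Prop :=
  ∀ row ∈ data, ((PySem.List.pyGet? row pos).any (fun d => decide (-10 ≤ d ∧ d < 10))) = true
instance (data : List (List Int)) (pos : Int) : Decidable (Pre_delay_digit data pos) := by unfold Pre_delay_digit; infer_instance

def pvWitness_delay_digit : List (List Int) × Int := ([[3, 7], [5, 2], [3, 9]], 1)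

-- On inputs where some row before the last selects a negative value in -10..-1, A wraps it into
-- last_seen by Python negative indexing and reports a bogus delay for the digit 10+d, while B
-- reports delay 0 for every digit 0..9 not actually seen — the intended value, since digits are 0..9.
def D_delay_digit (data : List (List Int)) (pos : Int) : Prop :=
  ∃ row ∈ data.dropLast, ((PySem.List.pyGet? row pos).any (fun d => decide (d < 0))) = true
instance (data : List (List Int)) (pos : Int) : Decidable (D_delay_digit data pos) := by unfold D_delay_digit; infer_instance

def Spec_delay_digit (data : List (List Int)) (pos : Int) (out : List Int) : Prop := ¬ D_delay_digit data pos → out = delay_digit_alt data pos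
instance (data : List (List Int)) (pos : Int) (out : List Int) : Decidable (Spec_delay_digit data pos out) := by unfold Spec_delay_digit; infer_instance

def pvDiffWitness_delay_digit : List (List Int) × Int := ([[-1], [5]], 0)
def pvDiffWitnessOut_delay_digit : (List Int) × (List Int) :=
  ([0, 0, 0, 0, 0, 0, 0, 0, 0, 1], [0, 0, 0, 0, 0, 0, 0, 0, 0, 0])

-- ===== CLAIM (what is proved, stated in full; the proofs are below) =====
def Claim_unchanged_delay_digit : Prop := ∀ (data : List (List Int)) (pos : Int), Dom_delay_digit data pos → Pre_delay_digit data pos → Spec_delay_digit data pos (delay_digit data pos)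
def Claim_changed_delay_digit : Prop := Dom_delay_digit (pvDiffWitness_delay_digit.1) (pvDiffWitness_delay_digit.2) ∧ Pre_delay_digit (pvDiffWitness_delay_digit.1) (pvDiffWitness_delay_digit.2) ∧ D_delay_digit (pvDiffWitness_delay_digit.1) (pvDiffWitness_delay_digit.2) ∧ delay_digit (pvDiffWitness_delay_digit.1) (pvDiffWitness_delay_digit.2) = pvDiffWitnessOut_delay_digit.1 ∧ delay_digit_alt (pvDiffWitness_delay_digit.1) (pvDiffWitness_delay_digit.2) = pvDiffWitnessOut_delay_digit.2 ∧ pvDiffWitnessOut_delay_digit.1 ≠ pvDiffWitnessOut_delay_digit.2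

-- ===== LEMMAS AND PROOFS =====

def pvDig (pos : Int) (row : List Int) : Int := (PySem.List.pyGet? row pos).getD 0

def pvInner (ls : List Int) (i : Int) (dl : List Int) : List Int :=
  (PySem.List.pyRange 0 10 1).foldl (fun dl d =>
    if PySem.List.pyGetD ls d 0 ≠ -1 then PySem.List.pySetD dl d (i - PySem.List.pyGetD ls d 0) else dl) dl

def pvStepA (pos : Int) (st : List Int × List Int) (p : Int × List Int) : List Int × List Int :=
  (pvInner st.2 p.1 st.1, PySem.List.pySetD st.2 (pvDig pos p.2) p.1)

def pvStepB (pos : Int) (d : PySem.Dict Int Int) (p : Int × List Int) : PySem.Dict Int Int :=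
  d.insert (pvDig pos p.2) p.1

theorem delay_digit_eq (data : List (List Int)) (pos : Int) :
    delay_digit data pos =
      ((PySem.List.enumerate data 0).foldl (pvStepA pos) (List.replicate 10 0, List.replicate 10 (-1))).1 := rfl

theorem delay_digit_alt_eq (data : List (List Int)) (pos : Int) :
    delay_digit_alt data pos =
      (PySem.List.pyRange 0 10 1).map (fun dd =>
        match ((PySem.List.enumerate data.dropLast 0).foldl (pvStepB pos) PySem.Dict.empty).get? dd with
        | some i => (data.length : Int) - 1 - i
        | none => 0) := by
  simp only [delay_digit_alt, PySem.List.slice_to_neg_one]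
  rfl

theorem pvStep_length (ls : List Int) (i : Int) (l : List Int) (dl : List Int) :
    (l.foldl (fun dl d =>
      if PySem.List.pyGetD ls d 0 ≠ -1 then PySem.List.pySetD dl d (i - PySem.List.pyGetD ls d 0) else dl) dl).length
    = dl.length := by
  induction l generalizing dl with
  | nil => rfl
  | cons x xs ih =>
    rw [List.foldl_cons, ih]
    split_ifs
    · exact PySem.List.length_pySetD dl x _
    · rfl

theorem pvInner_getD_gen (ls : List Int) (i : Int) (n : Nat) (dl : List Int) (d : Nat)
    (hd : d < dl.length) :
    ((PySem.List.pyRange 0 (n : Int) 1).foldl (fun dl dd =>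
      if PySem.List.pyGetD ls dd 0 ≠ -1 then PySem.List.pySetD dl dd (i - PySem.List.pyGetD ls dd 0) else dl) dl).getD d 0
    = if d < n ∧ ls.getD d 0 ≠ -1 then i - ls.getD d 0 else dl.getD d 0 := by
  induction n with
  | zero =>
    rw [show ((0 : Nat) : Int) = 0 from rfl, PySem.List.pyRange_one_eq_nil le_rfl]
    simp
  | succ n ih =>
    rw [show ((n + 1 : Nat) : Int) = (n : Int) + 1 by push_cast; ring,
        PySem.List.pyRange_one_succ_right (by positivity), List.foldl_append,
        List.foldl_cons, List.foldl_nil]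
    have hlen : ((PySem.List.pyRange 0 (n : Int) 1).foldl (fun dl dd =>
        if PySem.List.pyGetD ls dd 0 ≠ -1 then PySem.List.pySetD dl dd (i - PySem.List.pyGetD ls dd 0) else dl) dl).length
        = dl.length := pvStep_length ls i _ dl
    rw [PySem.List.pyGetD_natCast]
    by_cases hc : ls.getD n 0 ≠ -1
    · rw [if_pos hc, PySem.List.pySetD_natCast]
      by_cases hdn : d = n
      · subst hdn
        rw [List.getD_eq_getElem?_getD, List.getElem?_set_self (by rw [hlen]; exact hd)]
        rw [if_pos ⟨by omega, hc⟩]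
        rfl
      · rw [List.getD_eq_getElem?_getD, List.getElem?_set_ne (fun hh => hdn hh.symm),
            ← List.getD_eq_getElem?_getD, ih]
        have heq2 : (d < n + 1 ∧ ls.getD d 0 ≠ -1) ↔ (d < n ∧ ls.getD d 0 ≠ -1) :=
          ⟨fun h => ⟨by omega, h.2⟩, fun h => ⟨by omega, h.2⟩⟩
        rw [if_congr heq2 rfl rfl]
    · rw [if_neg hc, ih]
      push Not at hc
      by_cases hdn : d = n
      · subst hdn
        rw [if_neg (fun hh => hh.2 hc), if_neg (fun hh => hh.2 hc)]
      · have heq2 : (d < n + 1 ∧ ls.getD d 0 ≠ -1) ↔ (d < n ∧ ls.getD d 0 ≠ -1) :=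
          ⟨fun h => ⟨by omega, h.2⟩, fun h => ⟨by omega, h.2⟩⟩
        rw [if_congr heq2 rfl rfl]

theorem pvInner_getD (ls dl : List Int) (i : Int) (d : Nat) (hd : d < 10) (hdl : dl.length = 10) :
    (pvInner ls i dl).getD d 0 = if ls.getD d 0 ≠ -1 then i - ls.getD d 0 else dl.getD d 0 := by
  unfold pvInner
  rw [show (10 : Int) = ((10 : Nat) : Int) from rfl,
      pvInner_getD_gen ls i 10 dl d (by omega)]
  have heq : (d < 10 ∧ ls.getD d 0 ≠ -1) ↔ ls.getD d 0 ≠ -1 := ⟨fun h => h.2, fun h => ⟨hd, h⟩⟩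
  rw [if_congr heq rfl rfl]

theorem pvInner_length (ls dl : List Int) (i : Int) : (pvInner ls i dl).length = dl.length :=
  pvStep_length ls i _ dl

def pvR (st : List Int × List Int) (dct : PySem.Dict Int Int) : Prop :=
  st.1.length = 10 ∧ st.2.length = 10 ∧ ∀ d : Nat, d < 10 →
    (st.2.getD d 0 = -1 ∧ dct.get? (d : Int) = none ∧ st.1.getD d 0 = 0) ∨
    (∃ j : Int, 0 ≤ j ∧ st.2.getD d 0 = j ∧ dct.get? (d : Int) = some j)

theorem pvR_step (pos : Int) (st : List Int × List Int) (dct : PySem.Dict Int Int)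
    (i : Int) (row : List Int) (hi : 0 ≤ i)
    (hrow : ((PySem.List.pyGet? row pos).any (fun d => decide (0 ≤ d ∧ d < 10))) = true)
    (h : pvR st dct) : pvR (pvStepA pos st (i, row)) (pvStepB pos dct (i, row)) := by
  obtain ⟨h1, h2, h3⟩ := h
  obtain ⟨v, hv, hv0, hv10⟩ : ∃ v, PySem.List.pyGet? row pos = some v ∧ 0 ≤ v ∧ v < 10 := by
    cases hq : PySem.List.pyGet? row pos with
    | none => rw [hq] at hrow; simp [Option.any] at hrow
    | some v =>
      rw [hq] at hrow; simp [Option.any] at hrow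
      exact ⟨v, rfl, hrow.1, hrow.2⟩
  have hdig : pvDig pos row = v := by simp [pvDig, hv]
  have hset : PySem.List.pySetD st.2 (pvDig pos row) i = st.2.set v.toNat i := by
    rw [hdig]; exact PySem.List.pySetD_of_nonneg st.2 i hv0
  refine ⟨?_, ?_, ?_⟩
  · simpa [pvStepA, pvInner_length] using h1
  · simp only [pvStepA, hset, List.length_set]; exact h2
  · intro d hd
    have hnew2 : (pvStepA pos st (i, row)).2.getD d 0 =
        if d = v.toNat then i else st.2.getD d 0 := by
      simp only [pvStepA, hset]
      by_cases hdv : d = v.toNat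
      · subst hdv
        rw [List.getD_eq_getElem?_getD, List.getElem?_set_self (by rw [h2]; omega), if_pos rfl]
        rfl
      · rw [List.getD_eq_getElem?_getD, List.getElem?_set_ne (fun hh => hdv hh.symm),
            if_neg hdv, ← List.getD_eq_getElem?_getD]
    have hnew1 : (pvStepA pos st (i, row)).1.getD d 0 =
        if st.2.getD d 0 ≠ -1 then i - st.2.getD d 0 else st.1.getD d 0 := by
      simpa [pvStepA] using pvInner_getD st.2 st.1 i d hd h1
    have hget : (pvStepB pos dct (i, row)).get? (d : Int) =
        if (d : Int) = v then some i else dct.get? (d : Int) := by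
      simp only [pvStepB, hdig]
      exact PySem.Dict.get?_insert dct v (d : Int) i
    by_cases hdv : d = v.toNat
    · right
      refine ⟨i, hi, ?_, ?_⟩
      · rw [hnew2, if_pos hdv]
      · rw [hget, if_pos (by omega)]
    · have hne : (d : Int) ≠ v := by omega
      rcases h3 d hd with ⟨ha, hb, hc⟩ | ⟨j, hj0, hja, hjb⟩
      · left
        refine ⟨?_, ?_, ?_⟩
        · rw [hnew2, if_neg hdv]; exact ha
        · rw [hget, if_neg hne]; exact hb
        · rw [hnew1, ha, if_neg (by simp)]; exact hc
      · right
        refine ⟨j, hj0, ?_, ?_⟩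
        · rw [hnew2, if_neg hdv]; exact hja
        · rw [hget, if_neg hne]; exact hjb

theorem pvR_fold (pos : Int) (l : List (List Int)) :
    ∀ (i0 : Int) (st : List Int × List Int) (dct : PySem.Dict Int Int), 0 ≤ i0 →
    (∀ row ∈ l, ((PySem.List.pyGet? row pos).any (fun d => decide (0 ≤ d ∧ d < 10))) = true) →
    pvR st dct →
    pvR ((PySem.List.enumerate l i0).foldl (pvStepA pos) st)
        ((PySem.List.enumerate l i0).foldl (pvStepB pos) dct) := by
  induction l with
  | nil => intro i0 st dct _ _ h; simpa [PySem.List.enumerate_nil] using h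
  | cons row rest ih =>
    intro i0 st dct hi0 hrows h
    rw [PySem.List.enumerate_cons, List.foldl_cons, List.foldl_cons]
    exact ih (i0 + 1) _ _ (by omega) (fun r hr => hrows r (List.mem_cons_of_mem _ hr))
      (pvR_step pos st dct i0 row hi0 (hrows row List.mem_cons_self) h)

theorem pvR_init : pvR (List.replicate 10 0, List.replicate 10 (-1)) PySem.Dict.empty := by
  refine ⟨by simp, by simp, ?_⟩
  intro d hd
  left
  refine ⟨?_, ?_, ?_⟩
  · rw [List.getD_eq_getElem?_getD, List.getElem?_replicate, if_pos hd]; rfl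
  · exact PySem.Dict.get?_empty _
  · rw [List.getD_eq_getElem?_getD, List.getElem?_replicate, if_pos hd]; rfl

-- ===== VERDICT (by name: the statement is the Claim_ definition above) =====
theorem delay_digit_spec : Claim_unchanged_delay_digit := by
  intro data pos _hdom hpre
  unfold Spec_delay_digit
  intro hnD
  rcases List.eq_nil_or_concat data with hnil | ⟨l, r, hlr⟩
  · subst hnil; rfl
  · subst hlr
    simp only [List.concat_eq_append] at hpre hnD ⊢
    replace hpre : ∀ row ∈ l ++ [r],
        ((PySem.List.pyGet? row pos).any (fun d => decide (-10 ≤ d ∧ d < 10))) = true := hpre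
    replace hnD : ¬ ∃ row ∈ (l ++ [r]).dropLast,
        ((PySem.List.pyGet? row pos).any (fun d => decide (d < 0))) = true := hnD
    rw [List.dropLast_concat] at hnD
    have hrows : ∀ row ∈ l,
        ((PySem.List.pyGet? row pos).any (fun d => decide (0 ≤ d ∧ d < 10))) = true := by
      intro row hr
      have h1 := hpre row (List.mem_append_left _ hr)
      cases hq : PySem.List.pyGet? row pos with
      | none => rw [hq] at h1; simp [Option.any] at h1
      | some v =>
        rw [hq] at h1; simp [Option.any] at h1 ⊢
        refine ⟨?_, h1.2⟩
        by_contra hneg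
        exact hnD ⟨row, hr, by rw [hq]; simp [Option.any]; omega⟩
    rw [delay_digit_eq, delay_digit_alt_eq]
    rw [List.dropLast_concat]
    rw [PySem.List.enumerate_append, PySem.List.enumerate_cons, PySem.List.enumerate_nil,
        List.foldl_append, List.foldl_cons, List.foldl_nil]
    set stL := (PySem.List.enumerate l 0).foldl (pvStepA pos) (List.replicate 10 0, List.replicate 10 (-1)) with hstL
    set dctL := (PySem.List.enumerate l 0).foldl (pvStepB pos) PySem.Dict.empty with hdctL
    have hR : pvR stL dctL := pvR_fold pos l 0 _ _ le_rfl hrows pvR_init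
    obtain ⟨hR1, hR2, hR3⟩ := hR
    have hlenA : (pvStepA pos stL (0 + (l.length : Int), r)).1.length = 10 := by
      simpa [pvStepA, pvInner_length] using hR1
    apply List.ext_getElem
    · rw [hlenA, List.length_map, PySem.List.length_pyRange_one]; decide
    · intro d hdA hdB
      have hd : d < 10 := by omega
      rw [List.getElem_map, PySem.List.getElem_pyRange_one]
      have hLHS : (pvStepA pos stL (0 + (l.length : Int), r)).1[d] =
          (pvStepA pos stL (0 + (l.length : Int), r)).1.getD d 0 :=
        (List.getD_eq_getElem _ _ (by omega)).symm
      rw [hLHS]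
      have hval : (pvStepA pos stL (0 + (l.length : Int), r)).1.getD d 0 =
          if stL.2.getD d 0 ≠ -1 then (0 + (l.length : Int)) - stL.2.getD d 0 else stL.1.getD d 0 := by
        simpa [pvStepA] using pvInner_getD stL.2 stL.1 (0 + (l.length : Int)) d hd hR1
      rw [hval]
      rcases hR3 d hd with ⟨ha, hb, hc⟩ | ⟨j, hj0, hja, hjb⟩
      · rw [ha, if_neg (by simp)]
        rw [show ((0 : Int) + (d : Int)) = (d : Int) by ring, hb]
        exact hc
      · rw [hja, if_pos (by omega)]
        rw [show ((0 : Int) + (d : Int)) = (d : Int) by ring, hjb]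
        simp only [List.length_append, List.length_cons, List.length_nil]
        push_cast
        ring

theorem delay_digit_changed : Claim_changed_delay_digit := by
  unfold Claim_changed_delay_digit; decide
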